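-- pv_equiv track=rewrite | github.com/BroeDienz/python_task | noodle.py | cook_noodle
-- ===== SOURCE A (Python) =====
-- def cook_noodle(cooking_seconds):
--     cooking_time = 120
--     seconds = 0
--
--     while seconds < cooking_seconds:
--         seconds += 1
--     if seconds >= cooking_time:
--         return "READY"
--     else:
--         return "COOKING"
-- ===== SOURCE B (Python) =====
-- def cook_noodle(cooking_seconds):
--     return "READY" if cooking_seconds >= 120 else "COOKING"
-- ===== Notes on version B (the rewrite author's own statement) =====
-- stated objective: simpler
-- what changed: Replaced the second-by-second counting loop with a direct threshold comparison (cooking_seconds >= 120), since the loop just computes max(0, cooking_seconds).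
import Mathlib
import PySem

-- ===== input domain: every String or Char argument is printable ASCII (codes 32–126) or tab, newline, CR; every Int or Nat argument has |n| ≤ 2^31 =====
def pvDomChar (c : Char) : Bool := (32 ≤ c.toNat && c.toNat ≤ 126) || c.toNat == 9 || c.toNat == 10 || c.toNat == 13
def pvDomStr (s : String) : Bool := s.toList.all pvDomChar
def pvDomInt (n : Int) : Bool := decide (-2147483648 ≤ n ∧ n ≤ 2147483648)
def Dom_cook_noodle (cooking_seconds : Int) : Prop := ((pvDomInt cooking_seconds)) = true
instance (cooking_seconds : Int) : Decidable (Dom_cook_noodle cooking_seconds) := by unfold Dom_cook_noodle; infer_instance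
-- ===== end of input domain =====

-- B replaces A's second-by-second counting loop with a direct threshold comparison (simpler, closed form).


-- ===== PORT A =====
-- the while loop 'while seconds < cooking_seconds: seconds += 1', transliterated as recursion
def cookLoop (seconds cooking_seconds : Int) : Int :=
  if h : seconds < cooking_seconds then cookLoop (seconds + 1) cooking_seconds else seconds
termination_by (cooking_seconds - seconds).toNat
decreasing_by omega

def cook_noodle (cooking_seconds : Int) : String :=
  let cooking_time : Int := 120
  let seconds := cookLoop 0 cooking_seconds
  if seconds ≥ cooking_time then "READY" else "COOKING"

-- ===== PORT B =====
def cook_noodle_alt (cooking_seconds : Int) : String :=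
  if cooking_seconds ≥ 120 then "READY" else "COOKING"

-- ===== PRECONDITION & SPEC =====
def Spec_cook_noodle (cooking_seconds : Int) (out : String) : Prop := out = cook_noodle_alt cooking_seconds
instance (cooking_seconds : Int) (out : String) : Decidable (Spec_cook_noodle cooking_seconds out) := by unfold Spec_cook_noodle; infer_instance

-- ===== CLAIM (what is proved, stated in full; the proofs are below) =====
def Claim_equal_cook_noodle : Prop := ∀ (cooking_seconds : Int), Dom_cook_noodle cooking_seconds → Spec_cook_noodle cooking_seconds (cook_noodle cooking_seconds)

-- ===== LEMMAS AND PROOFS =====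
theorem cookLoop_eq (seconds cooking_seconds : Int) :
    cookLoop seconds cooking_seconds = max seconds cooking_seconds := by
  by_cases h : seconds < cooking_seconds
  · have : (cooking_seconds - (seconds + 1)).toNat < (cooking_seconds - seconds).toNat := by omega
    rw [cookLoop, dif_pos h, cookLoop_eq (seconds + 1) cooking_seconds]
    omega
  · rw [cookLoop, dif_neg h]; omega
termination_by (cooking_seconds - seconds).toNat
decreasing_by omega

-- ===== VERDICT (by name: the statement is the Claim_ definition above) =====
theorem cook_noodle_spec : Claim_equal_cook_noodle := by
  intro c _
  unfold Spec_cook_noodle cook_noodle cook_noodle_alt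
  rw [cookLoop_eq]
  simp only []
  split_ifs with h1 h2 h2 <;> simp_all <;> omega
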